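-- pv_equiv track=rewrite | github.com/dgoldman0/graphnumbers | reboot/canonstar.py | induced_subgraph
-- ===== SOURCE A (Python) =====
-- from typing import Dict, Iterable, List, Optional, Sequence, Tuple
--
-- def induced_subgraph(bitrows: Sequence[int], verts: Sequence[int]) -> List[int]:
--     """Induced subgraph on verts, reindexed to 0..k-1, returned as bitrows."""
--     idx = {v: i for i, v in enumerate(verts)}
--     k = len(verts)
--     out = [0] * k
--     for i, v in enumerate(verts):
--         row = bitrows[v]
--         nr = 0
--         for w in verts:
--             if ((row >> w) & 1) == 1:
--                 nr |= (1 << idx[w])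
--         nr &= ~(1 << i)
--         out[i] = nr
--     return out
-- ===== SOURCE B (Python) =====
-- def induced_subgraph(bitrows, verts):
--     """Induced subgraph on verts, reindexed to 0..k-1, returned as bitrows.
--
--     Builds a selection mask of the chosen vertices once; each new row is
--     obtained by intersecting the old row with the mask and translating the
--     surviving set bits (extracted lowest-first) to their new indices, then
--     clearing the diagonal bit.
--     """
--     idx = {v: i for i, v in enumerate(verts)}
--     mask = 0
--     for w in verts:
--         mask |= 1 << w
--     out = []
--     for i, v in enumerate(verts):
--         rel = bitrows[v] & mask
--         nr = 0
--         while rel: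
--             low = rel & -rel
--             nr |= 1 << idx[low.bit_length() - 1]
--             rel ^= low
--         out.append(nr & ~(1 << i))
--     return out
-- ===== Notes on version B (the rewrite author's own statement) =====
-- stated objective: alternative
-- what changed: Instead of testing every candidate vertex's bit in every row (nested loop over verts), B precomputes a selection bitmask once, intersects each row with it and translates only the actually-present neighbour bits to new indices by repeatedly extracting the lowest set bit.
import Mathlib
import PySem

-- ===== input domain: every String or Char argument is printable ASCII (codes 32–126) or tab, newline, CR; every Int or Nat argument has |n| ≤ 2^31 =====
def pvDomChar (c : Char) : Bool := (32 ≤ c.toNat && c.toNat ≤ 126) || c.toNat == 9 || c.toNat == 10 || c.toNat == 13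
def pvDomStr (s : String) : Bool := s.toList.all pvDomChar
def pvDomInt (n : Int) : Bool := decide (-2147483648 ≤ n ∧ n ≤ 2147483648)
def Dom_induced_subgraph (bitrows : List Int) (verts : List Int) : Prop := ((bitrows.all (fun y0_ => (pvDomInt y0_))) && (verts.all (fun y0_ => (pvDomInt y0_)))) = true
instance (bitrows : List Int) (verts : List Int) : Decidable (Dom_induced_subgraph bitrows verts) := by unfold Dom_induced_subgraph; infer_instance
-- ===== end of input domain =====

-- B builds a selection mask once, intersects each row with it and translates the
-- surviving set bits (extracted lowest-first) to their new indices (objective: alternative).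

-- ===== PORT A =====
def induced_subgraph (bitrows : List Int) (verts : List Int) : List Int :=
  let idx : PySem.Dict Int Int :=
    (PySem.List.enumerate verts 0).foldl (fun d p => d.insert p.2 p.1) PySem.Dict.empty
  let k := verts.length
  (PySem.List.enumerate verts 0).foldl
    (fun out p =>
      let row := PySem.List.pyGetD bitrows p.2 0
      let nr := verts.foldl
        (fun nr w =>
          if PySem.Int.band (row >>> w.toNat) 1 == 1 then
            PySem.Int.bor nr ((1 : Int) <<< (idx.getD w 0).toNat)
          else nr) 0
      let nr := PySem.Int.band nr (Int.not ((1 : Int) <<< p.1.toNat))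
      PySem.List.pySetD out p.1 nr)
    (List.replicate k 0)

-- ===== PORT B =====
-- the 'while rel:' loop of Source B; fuel rel.natAbs bounds the number of set bits,
-- so with that fuel the recursion computes exactly what the Python loop computes
def pvBitLoop (idx : PySem.Dict Int Int) : Nat → Int → Int → Int
  | 0, _, nr => nr
  | fuel + 1, rel, nr =>
    if rel == 0 then nr
    else
      let low := PySem.Int.band rel (-rel)
      pvBitLoop idx fuel (PySem.Int.bxor rel low)
        (PySem.Int.bor nr ((1 : Int) <<< (idx.getD ((PySem.Int.bitLength low : Int) - 1) 0).toNat))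

def induced_subgraph_alt (bitrows : List Int) (verts : List Int) : List Int :=
  let idx : PySem.Dict Int Int :=
    (PySem.List.enumerate verts 0).foldl (fun d p => d.insert p.2 p.1) PySem.Dict.empty
  let mask : Int := verts.foldl (fun m w => PySem.Int.bor m ((1 : Int) <<< w.toNat)) 0
  (PySem.List.enumerate verts 0).foldl
    (fun out p =>
      let rel := PySem.Int.band (PySem.List.pyGetD bitrows p.2 0) mask
      let nr := pvBitLoop idx rel.natAbs rel 0
      out ++ [PySem.Int.band nr (Int.not ((1 : Int) <<< p.1.toNat))]) []

-- ===== PRECONDITION & SPEC =====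
-- Pre_: exactly the inputs on which Python A returns normally: every vertex must be a
-- valid nonnegative index into bitrows (a negative or too-large vertex makes A raise
-- IndexError at bitrows[v] or ValueError at row >> w).
def Pre_induced_subgraph (bitrows : List Int) (verts : List Int) : Prop :=
  ∀ v ∈ verts, 0 ≤ v ∧ v < (bitrows.length : Int)
instance (bitrows : List Int) (verts : List Int) : Decidable (Pre_induced_subgraph bitrows verts) := by
  unfold Pre_induced_subgraph; infer_instance

def pvWitness_induced_subgraph : List Int × List Int := ([5, 3, 6], [0, 2, 1])

def Spec_induced_subgraph (bitrows : List Int) (verts : List Int) (out : List Int) : Prop := out = induced_subgraph_alt bitrows verts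
instance (bitrows : List Int) (verts : List Int) (out : List Int) : Decidable (Spec_induced_subgraph bitrows verts out) := by unfold Spec_induced_subgraph; infer_instance

-- ===== CLAIM (what is proved, stated in full; the proofs are below) =====
def Claim_equal_induced_subgraph : Prop := ∀ (bitrows : List Int) (verts : List Int), Dom_induced_subgraph bitrows verts → Pre_induced_subgraph bitrows verts → Spec_induced_subgraph bitrows verts (induced_subgraph bitrows verts)

-- ===== LEMMAS AND PROOFS =====

-- Nat bit toolkit ------------------------------------------------------------

theorem pvAddDisj (a b : Nat) (h : a &&& b = 0) : a + b = a ||| b := by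
  induction a using Nat.binaryRec generalizing b with
  | zero => simp
  | bit ba na ih =>
    induction b using Nat.bitCasesOn with
    | bit bb nb =>
      rw [Nat.land_bit, Nat.bit_eq_zero_iff] at h
      have e := ih nb h.1
      have hb : (ba && bb) = false := h.2
      rw [Nat.lor_bit, Nat.bit_val, Nat.bit_val, Nat.bit_val]
      cases ba <;> cases bb <;>
        simp only [Bool.toNat_true, Bool.toNat_false, Bool.or_false, Bool.or_true] <;>
        first | omega | (exact absurd hb (by simp))

theorem pvSubLand (m n : Nat) : m - (m &&& n) = m.ldiff n := by
  have h1 : (m.ldiff n) &&& (m &&& n) = 0 := by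
    apply Nat.eq_of_testBit_eq
    intro t
    simp only [Nat.testBit_land, Nat.testBit_ldiff, Nat.zero_testBit]
    cases m.testBit t <;> cases n.testBit t <;> simp
  have h2 : (m.ldiff n) + (m &&& n) = m := by
    rw [pvAddDisj _ _ h1]
    apply Nat.eq_of_testBit_eq
    intro t
    simp only [Nat.testBit_or, Nat.testBit_land, Nat.testBit_ldiff]
    cases m.testBit t <;> cases n.testBit t <;> simp
  omega

theorem pvTestBitShift (m p : Nat) : m.testBit p = ((m >>> p) &&& 1 == 1) := by
  simp [Nat.testBit, Nat.and_one_is_mod, Nat.shiftRight_eq_div_pow]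

-- the lowest set bit: m & -m in Python, m.ldiff (m-1) on Nat
theorem pvBandNegSelf (m : Nat) (hm : 0 < m) :
    PySem.Int.band (↑m) (-(↑m : Int)) = ↑(m.ldiff (m - 1)) := by
  have h1 : ¬ (0 : Int) ≤ -(↑m : Int) := by omega
  simp only [PySem.Int.band, Int.natCast_nonneg, if_true, h1, if_false]
  have h2 : (-(-(↑m : Int)) - 1).toNat = m - 1 := by omega
  rw [h2, Int.toNat_natCast, pvSubLand]

theorem pvBitLengthPow (z : Nat) : PySem.Int.bitLength ((2 ^ z : Nat) : Int) = z + 1 := by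
  have h1 := PySem.Int.lt_two_pow_bitLength ((2 ^ z : Nat) : Int)
  have h2 := PySem.Int.two_pow_bitLength_le ((2 ^ z : Nat) : Int) (by positivity)
  rw [Int.natAbs_natCast] at h1 h2
  have h3 : z < PySem.Int.bitLength ((2 ^ z : Nat) : Int) :=
    (Nat.pow_lt_pow_iff_right (by omega)).mp h1
  have h4 : PySem.Int.bitLength ((2 ^ z : Nat) : Int) - 1 ≤ z :=
    (Nat.pow_le_pow_iff_right (by omega)).mp h2
  omega

theorem pvLdiffLow (m : Nat) (hm : 0 < m) :
    ∃ z, m.ldiff (m - 1) = 2 ^ z ∧ m.testBit z = true ∧ ∀ p, p < z → m.testBit p = false := by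
  induction m using Nat.strong_induction_on with
  | _ m ih =>
    rcases Nat.even_or_odd m with he | ho
    · obtain ⟨k, hk⟩ := he
      have hkpos : 0 < k := by omega
      obtain ⟨z, h1, h2, h3⟩ := ih k (by omega) hkpos
      have hbit : ∀ t, m.testBit (t + 1) = k.testBit t := by
        intro t
        rw [Nat.testBit_succ]
        congr 1
        omega
      have hm0 : m.testBit 0 = false := by
        rw [Nat.testBit_zero]
        simp
        omega
      refine ⟨z + 1, ?_, by rw [hbit]; exact h2, ?_⟩
      · apply Nat.eq_of_testBit_eq
        intro t
        cases t with
        | zero =>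
          rw [Nat.testBit_ldiff, hm0, Nat.testBit_two_pow]
          simp
        | succ t =>
          rw [Nat.testBit_ldiff, hbit, Nat.testBit_two_pow]
          have hm1 : (m - 1).testBit (t + 1) = (k - 1).testBit t := by
            rw [Nat.testBit_succ]
            congr 1
            omega
          rw [hm1, ← Nat.testBit_ldiff, h1, Nat.testBit_two_pow]
          by_cases hzt : z = t <;> simp [hzt]
      · intro p hp
        cases p with
        | zero => exact hm0
        | succ p => rw [hbit]; exact h3 p (by omega)
    · have h1 : m % 2 = 1 := Nat.odd_iff.mp ho
      have hm0 : m.testBit 0 = true := by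
        rw [Nat.testBit_zero]
        simp [h1]
      refine ⟨0, ?_, hm0, by omega⟩
      apply Nat.eq_of_testBit_eq
      intro t
      cases t with
      | zero =>
        rw [Nat.testBit_ldiff, hm0, pow_zero]
        have h2 : (m - 1).testBit 0 = false := by
          rw [Nat.testBit_zero]
          simp
          omega
        rw [h2]
        rfl
      | succ t =>
        rw [Nat.testBit_ldiff, pow_zero]
        have hq : m / 2 = (m - 1) / 2 := by omega
        rw [Nat.testBit_succ, Nat.testBit_succ, hq]
        have : Nat.testBit 1 (t + 1) = false := by
          rw [Nat.testBit_succ]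
          simp
        rw [this]
        cases ((m - 1) / 2).testBit t <;> simp

-- OR-accumulation folds ------------------------------------------------------

theorem pvOrFoldNat {α : Type} (l : List α) (c : α → Prop) [DecidablePred c] (h : α → Nat) :
    ∀ (m : Nat) (t : Nat),
      ((l.foldl (fun nr w => if c w then nr ||| (1 <<< h w) else nr) m).testBit t = true
        ↔ (m.testBit t = true ∨ ∃ w ∈ l, c w ∧ h w = t)) := by
  induction l with
  | nil => simp
  | cons x xs ih =>
    intro m t
    simp only [List.foldl_cons]
    by_cases hc : c x
    · rw [if_pos hc, ih]
      simp only [Nat.testBit_or, Nat.one_shiftLeft, Nat.testBit_two_pow, List.mem_cons]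
      constructor
      · rintro (hm | ⟨w, hw, hcw, hhw⟩)
        · rcases Bool.or_eq_true_iff.mp hm with h1 | h1
          · exact Or.inl h1
          · exact Or.inr ⟨x, Or.inl rfl, hc, of_decide_eq_true h1⟩
        · exact Or.inr ⟨w, Or.inr hw, hcw, hhw⟩
      · rintro (hm | ⟨w, hw, hcw, hhw⟩)
        · exact Or.inl (by simp [hm])
        · rcases hw with rfl | hw
          · exact Or.inl (by simp [hhw])
          · exact Or.inr ⟨w, hw, hcw, hhw⟩
    · rw [if_neg hc, ih]
      constructor
      · rintro (hm | ⟨w, hw, hcw, hhw⟩)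
        · exact Or.inl hm
        · exact Or.inr ⟨w, List.mem_cons_of_mem _ hw, hcw, hhw⟩
      · rintro (hm | ⟨w, hw, hcw, hhw⟩)
        · exact Or.inl hm
        · rcases List.mem_cons.mp hw with rfl | hw'
          · exact absurd hcw hc
          · exact Or.inr ⟨w, hw', hcw, hhw⟩

theorem pvOrFoldInt {α : Type} (l : List α) (c : α → Prop) [DecidablePred c] (h : α → Nat) :
    ∀ m : Nat,
      (l.foldl (fun nr w => if c w then PySem.Int.bor nr ((1 : Int) <<< h w) else nr) (↑m : Int))
        = ↑(l.foldl (fun nr w => if c w then nr ||| (1 <<< h w) else nr) m) := by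
  induction l with
  | nil => simp
  | cons x xs ih =>
    intro m
    simp only [List.foldl_cons]
    by_cases hc : c x
    · rw [if_pos hc, if_pos hc,
        show ((1 : Int) <<< h x) = ((1 <<< h x : Nat) : Int) by simp [Int.shiftLeft_eq, Nat.one_shiftLeft],
        PySem.Int.bor_natCast, ih]
    · rw [if_neg hc, if_neg hc, ih]

-- the selection mask ---------------------------------------------------------

theorem pvMaskFold (l : List Int) : ∀ m : Nat,
    (l.foldl (fun m w => PySem.Int.bor m ((1 : Int) <<< w.toNat)) (↑m : Int))
      = ↑(l.foldl (fun m w => m ||| (1 <<< w.toNat)) m) := by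
  induction l with
  | nil => simp
  | cons x xs ih =>
    intro m
    simp only [List.foldl_cons]
    rw [show ((1 : Int) <<< ((x.toNat : Int))) = ((1 <<< x.toNat : Nat) : Int) by
          rw [Int.shiftLeft_natCast_right]; simp [Int.shiftLeft_eq, Nat.one_shiftLeft],
        PySem.Int.bor_natCast, ih]

theorem pvMaskBits (l : List Int) : ∀ (m t : Nat),
    ((l.foldl (fun m w => m ||| (1 <<< w.toNat)) m).testBit t = true
      ↔ (m.testBit t = true ∨ ∃ w ∈ l, w.toNat = t)) := by
  induction l with
  | nil => simp
  | cons x xs ih =>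
    intro m t
    simp only [List.foldl_cons]
    rw [ih]
    simp only [Nat.testBit_or, Nat.one_shiftLeft, Nat.testBit_two_pow, List.mem_cons]
    constructor
    · rintro (hm | ⟨w, hw, hhw⟩)
      · rcases Bool.or_eq_true_iff.mp hm with h1 | h1
        · exact Or.inl h1
        · exact Or.inr ⟨x, Or.inl rfl, of_decide_eq_true h1⟩
      · exact Or.inr ⟨w, Or.inr hw, hhw⟩
    · rintro (hm | ⟨w, hw, hhw⟩)
      · exact Or.inl (by simp [hm])
      · rcases hw with rfl | hw
        · exact Or.inl (by simp [hhw])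
        · exact Or.inr ⟨w, hw, hhw⟩

-- row & mask -----------------------------------------------------------------

theorem pvPyBitPos (n p : Nat) : (PySem.Int.band (((n : Int)) >>> p) 1 == 1) = n.testBit p := by
  rw [show ((n : Int) >>> p) = ((n >>> p : Nat) : Int) by simp]
  rw [show (1 : Int) = ((1 : Nat) : Int) by rfl, PySem.Int.band_natCast, pvTestBitShift]
  rcases Nat.and_one_is_mod (n >>> p) ▸ Nat.mod_two_eq_zero_or_one (n >>> p) with h | h <;>
    simp [h]

theorem pvPyBitNeg (n p : Nat) : (PySem.Int.band ((Int.negSucc n) >>> p) 1 == 1) = !n.testBit p := by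
  rw [Int.negSucc_shiftRight]
  have hb : PySem.Int.band (Int.negSucc (n >>> p)) 1 = ↑(1 - (1 &&& (n >>> p))) := by
    have h1 : ¬ (0 : Int) ≤ Int.negSucc (n >>> p) :=
      Int.not_le.mpr (Int.negSucc_lt_zero _)
    simp only [PySem.Int.band, h1, if_false]
    rw [if_pos (by omega : (0:Int) ≤ 1)]
    have h2 : (-(Int.negSucc (n >>> p)) - 1) = ((n >>> p : Nat) : Int) := by
      rw [Int.negSucc_eq]; ring
    rw [h2, Int.toNat_natCast]
    rfl
  rw [hb, pvTestBitShift, Nat.land_comm 1 (n >>> p)]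
  rcases Nat.and_one_is_mod (n >>> p) ▸ Nat.mod_two_eq_zero_or_one (n >>> p) with h | h <;>
    simp [h]

theorem pvRelBit (row : Int) (maskN : Nat) :
    ∃ relN : Nat, PySem.Int.band row (↑maskN) = ↑relN ∧
      ∀ p, relN.testBit p = ((PySem.Int.band (row >>> p) 1 == 1) && maskN.testBit p) := by
  cases row with
  | ofNat n =>
    simp only [Int.ofNat_eq_natCast]
    refine ⟨n &&& maskN, by simp, ?_⟩
    intro p
    rw [pvPyBitPos, Nat.testBit_land]
  | negSucc n =>
    have hb : PySem.Int.band (Int.negSucc n) (↑maskN) = ↑(maskN.ldiff n) := by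
      have h1 : ¬ (0 : Int) ≤ Int.negSucc n :=
        Int.not_le.mpr (Int.negSucc_lt_zero _)
      simp only [PySem.Int.band, h1, if_false, Int.natCast_nonneg, if_true]
      have h2 : (-(Int.negSucc n) - 1) = ((n : Nat) : Int) := by
        rw [Int.negSucc_eq]; ring
      rw [h2, Int.toNat_natCast, Int.toNat_natCast, pvSubLand]
    refine ⟨maskN.ldiff n, hb, ?_⟩
    intro p
    rw [pvPyBitNeg, Nat.testBit_ldiff, Bool.and_comm]

-- the bit-extraction loop ----------------------------------------------------

theorem pvBitLoopBits (idx : PySem.Dict Int Int) :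
    ∀ (relN : Nat) (fuel : Nat) (nrN : Nat), relN ≤ fuel →
      ∃ rN : Nat, pvBitLoop idx fuel (↑relN) (↑nrN) = ↑rN ∧
        ∀ t, (rN.testBit t = true ↔ nrN.testBit t = true ∨
          ∃ p, relN.testBit p = true ∧ (idx.getD (↑p) 0).toNat = t) := by
  intro relN
  induction relN using Nat.strong_induction_on with
  | _ relN ih =>
    intro fuel nrN hfuel
    rcases Nat.eq_zero_or_pos relN with h0 | hpos
    · subst h0
      refine ⟨nrN, ?_, by simp⟩
      cases fuel with
      | zero => rfl
      | succ f => simp [pvBitLoop]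
    · obtain ⟨f, rfl⟩ : ∃ f, fuel = f + 1 := ⟨fuel - 1, by omega⟩
      obtain ⟨z, hlow, hz, hmin⟩ := pvLdiffLow relN hpos
      have hne : (((relN : Nat) : Int) == 0) = false := by
        simp
        omega
      rw [pvBitLoop]
      rw [if_neg (by simp [hne])]
      simp only []
      rw [pvBandNegSelf relN hpos, hlow, pvBitLengthPow]
      have hkey : (((z + 1 : Nat) : Int) - 1) = ((z : Nat) : Int) := by push_cast; ring
      rw [hkey]
      set g := (idx.getD ((z : Nat) : Int) 0).toNat with hg
      have hxor : PySem.Int.bxor (↑relN) (↑(2 ^ z : Nat)) = ↑(relN ^^^ 2 ^ z) :=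
        PySem.Int.bxor_natCast _ _
      have hbor : PySem.Int.bor (↑nrN) ((1 : Int) <<< g) = ↑(nrN ||| (1 <<< g)) := by
        rw [show ((1 : Int) <<< g) = ((1 <<< g : Nat) : Int) by
              simp [Int.shiftLeft_eq, Nat.one_shiftLeft]]
        exact PySem.Int.bor_natCast _ _
      rw [hxor, hbor]
      have hbitz : (relN ^^^ 2 ^ z).testBit z = false := by
        rw [Nat.testBit_xor, hz, Nat.testBit_two_pow]
        simp
      have hbitp : ∀ p, p ≠ z → (relN ^^^ 2 ^ z).testBit p = relN.testBit p := by
        intro p hp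
        rw [Nat.testBit_xor, Nat.testBit_two_pow,
          decide_eq_false (fun h => hp h.symm), Bool.xor_false]
      have hlt : relN ^^^ 2 ^ z < relN := by
        apply Nat.lt_of_testBit z hbitz hz
        intro j hj
        exact hbitp j (by omega)
      obtain ⟨rN, hrun, hbits⟩ := ih (relN ^^^ 2 ^ z) hlt f (nrN ||| (1 <<< g)) (by omega)
      refine ⟨rN, hrun, ?_⟩
      intro t
      rw [hbits]
      simp only [Nat.testBit_or, Nat.one_shiftLeft, Nat.testBit_two_pow]
      constructor
      · rintro (h | ⟨p, hp1, hp2⟩)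
        · rcases Bool.or_eq_true_iff.mp h with h1 | h1
          · exact Or.inl h1
          · exact Or.inr ⟨z, hz, by rw [← of_decide_eq_true h1]⟩
        · by_cases hpz : p = z
          · subst hpz
            rw [hbitz] at hp1
            exact absurd hp1 (by simp)
          · exact Or.inr ⟨p, by rw [← hbitp p hpz]; exact hp1, hp2⟩
      · rintro (h | ⟨p, hp1, hp2⟩)
        · exact Or.inl (by simp [h])
        · by_cases hpz : p = z
          · subst hpz
            exact Or.inl (by simp [hg, hp2])
          · exact Or.inr ⟨p, by rw [hbitp p hpz]; exact hp1, hp2⟩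

-- prefilled-list set loop = map ----------------------------------------------

theorem pvTakeSet (out : List Int) (s : Nat) (a : Int) (hs : s < out.length) :
    (out.set s a).take (s + 1) = out.take s ++ [a] := by
  apply List.ext_getElem
  · simp; omega
  · intro i h1 h2
    simp only [List.getElem_take, List.getElem_set]
    by_cases hi : s = i
    · subst hi
      rw [if_pos rfl, List.getElem_append_right (by simp)]
      simp
    · have hilt : i < s := by simp at h1; omega
      rw [if_neg hi, List.getElem_append_left (by simp; omega)]
      simp

theorem pvSetFold (F : Int × Int → Int) :
    ∀ (l : List Int) (s : Nat) (out : List Int), out.length = s + l.length →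
      (PySem.List.enumerate l (↑s)).foldl (fun o p => PySem.List.pySetD o p.1 (F p)) out
        = out.take s ++ (PySem.List.enumerate l (↑s)).map F := by
  intro l
  induction l with
  | nil =>
    intro s out h
    simp only [PySem.List.enumerate_nil, List.foldl_nil, List.map_nil, List.append_nil]
    simp only [List.length_nil] at h
    rw [List.take_of_length_le (by omega)]
  | cons x xs ih =>
    intro s out h
    simp only [List.length_cons] at h
    simp only [PySem.List.enumerate_cons, List.foldl_cons, List.map_cons]
    have hcast : ((s : Int) + 1) = ((s + 1 : Nat) : Int) := by push_cast; ring
    rw [hcast, PySem.List.pySetD_natCast]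
    rw [ih (s+1) (out.set s (F (↑s, x))) (by simp only [List.length_set]; omega)]
    rw [pvTakeSet out s _ (by omega)]
    simp

theorem pvSetFold0 (F : Int × Int → Int) (l : List Int) (out : List Int)
    (h : out.length = l.length) :
    (PySem.List.enumerate l 0).foldl (fun o p => PySem.List.pySetD o p.1 (F p)) out
      = (PySem.List.enumerate l 0).map F := by
  have h0 := pvSetFold F l 0 out (by omega)
  rw [Nat.cast_zero] at h0
  rw [h0, List.take_zero, List.nil_append]

theorem pvOrFoldInt0 {α : Type} (l : List α) (c : α → Prop) [DecidablePred c] (h : α → Nat) :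
    (l.foldl (fun nr w => if c w then PySem.Int.bor nr ((1 : Int) <<< h w) else nr) (0 : Int))
      = ↑(l.foldl (fun nr w => if c w then nr ||| (1 <<< h w) else nr) (0 : Nat)) := by
  have h0 := pvOrFoldInt l c h 0
  rw [Nat.cast_zero] at h0
  exact h0

-- the per-row core: A's test-every-vertex OR equals B's mask-and-extract loop
theorem pvElem (bitrows verts : List Int) (row : Int)
    (hpre : ∀ v ∈ verts, 0 ≤ v ∧ v < (bitrows.length : Int)) :
    (verts.foldl
        (fun nr w =>
          if (PySem.Int.band (row >>> w.toNat) 1 == 1) = true then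
            PySem.Int.bor nr
              ((1 : Int) <<<
                (((PySem.List.enumerate verts 0).foldl (fun (d : PySem.Dict Int Int) p => d.insert p.2 p.1)
                    PySem.Dict.empty).getD w 0).toNat)
          else nr)
        0)
      = pvBitLoop
          ((PySem.List.enumerate verts 0).foldl (fun (d : PySem.Dict Int Int) p => d.insert p.2 p.1)
            PySem.Dict.empty)
          (PySem.Int.band row
            (verts.foldl (fun m w => PySem.Int.bor m ((1 : Int) <<< w.toNat)) 0)).natAbs
          (PySem.Int.band row
            (verts.foldl (fun m w => PySem.Int.bor m ((1 : Int) <<< w.toNat)) 0))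
          0 := by
  set idx := (PySem.List.enumerate verts 0).foldl (fun (d : PySem.Dict Int Int) p => d.insert p.2 p.1)
    PySem.Dict.empty with hidx
  have hmask := pvMaskFold verts 0
  rw [Nat.cast_zero] at hmask
  set maskN := verts.foldl (fun m w => m ||| (1 <<< w.toNat)) 0 with hmaskN
  rw [hmask]
  obtain ⟨relN, hrel, hrelbit⟩ := pvRelBit row maskN
  rw [hrel, Int.natAbs_natCast]
  obtain ⟨rN, hrun, hbits⟩ := pvBitLoopBits idx relN relN 0 le_rfl
  rw [Nat.cast_zero] at hrun
  rw [hrun]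
  rw [pvOrFoldInt0 verts (fun w => (PySem.Int.band (row >>> ((w.toNat : Int))) 1 == 1) = true)
        (fun w => (idx.getD w 0).toNat)]
  congr 1
  apply Nat.eq_of_testBit_eq
  intro t
  rw [Bool.eq_iff_iff]
  rw [pvOrFoldNat, hbits]
  simp only [Nat.zero_testBit, Bool.false_eq_true, false_or]
  constructor
  · rintro ⟨w, hw, hc, hh⟩
    refine ⟨w.toNat, ?_, ?_⟩
    · rw [hrelbit, Int.shiftRight_natCast_right] at *
      rw [hc, Bool.true_and]
      exact (pvMaskBits verts 0 w.toNat).mpr (Or.inr ⟨w, hw, rfl⟩)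
    · rw [Int.toNat_of_nonneg (hpre w hw).1]
      exact hh
  · rintro ⟨p, hp, hh⟩
    rw [hrelbit] at hp
    rcases Bool.and_eq_true_iff.mp hp with ⟨hc, hm⟩
    rcases (pvMaskBits verts 0 p).mp hm with h0 | ⟨w, hw, hwp⟩
    · exact absurd h0 (by simp)
    · refine ⟨w, hw, ?_, ?_⟩
      · show (PySem.Int.band (row >>> ((w.toNat : Int))) 1 == 1) = true
        rw [Int.shiftRight_natCast_right, hwp]; exact hc
      · rw [← hh, ← hwp, Int.toNat_of_nonneg (hpre w hw).1]

-- ===== VERDICT (by name: the statement is the Claim_ definition above) =====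
theorem induced_subgraph_spec : Claim_equal_induced_subgraph := by
  intro bitrows verts _ hpre
  show induced_subgraph bitrows verts = induced_subgraph_alt bitrows verts
  simp only [induced_subgraph, induced_subgraph_alt]
  rw [pvSetFold0 _ verts _ (by simp), PySem.List.foldl_append_singleton_eq_map, List.nil_append]
  apply List.map_congr_left
  intro p hp
  have h := pvElem bitrows verts (PySem.List.pyGetD bitrows p.2 0) hpre
  simp only at h
  rw [h]
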